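-- pv_equiv track=rewrite | github.com/deepomicslab/LocalHaplotypeSolver | JuncGraph/EulerianCircuit.py | _breakdown_qq
-- ===== SOURCE A (Python) =====
-- def _breakdown_qq(cycle_list, break_point_v):
--     new_cycle_list = []
--     for cyc in cycle_list:
--         reached_first_bp = False
--         new_cyc = []
--         base_cyc = []
--         for v in cyc:
--             if v == break_point_v:
--                 if reached_first_bp:
--                     # End of a new cycle
--                     new_cyc.append(v)
--                     new_cycle_list.append(new_cyc)
--                     new_cyc = [v]
--                 else:
--                     # In base cycle
--                     reached_first_bp = True
--                     new_cyc = [v]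
--             else:
--                 if reached_first_bp:
--                     new_cyc.append(v)
--                 else:
--                     base_cyc.append(v)
--         if v != break_point_v:
--             # need to fill base cyc
--             new_cycle_list.append(base_cyc + new_cyc)
--
--     return new_cycle_list
-- ===== SOURCE B (Python) =====
-- def _breakdown_qq(cycle_list, break_point_v):
--     # Return-value equivalent of A for cycle lists whose cycles are all non-empty.
--     result = []
--     for cyc in cycle_list:
--         idx = [i for i, v in enumerate(cyc) if v == break_point_v]
--         for a, b in zip(idx, idx[1:]):
--             result.append(cyc[a:b + 1])
--         if cyc[-1] != break_point_v:
--             if idx: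
--                 result.append(cyc[:idx[0]] + cyc[idx[-1]:])
--             else:
--                 result.append(list(cyc))
--     return result
-- ===== Notes on version B (the rewrite author's own statement) =====
-- stated objective: alternative
-- what changed: A's single-pass flag/accumulator scan (reached_first_bp state machine building segments incrementally) is replaced by a two-phase decomposition: first collect the indices of the break-point vertex with enumerate, then emit each consecutive-index slice cyc[idx[k]:idx[k+1]+1] and finally cyc[:idx[0]] + cyc[idx[-1]:] (or a copy when there is no break point) when the cycle does not end on the break point.
-- outside the precondition, e.g. on _breakdown_qq([[1], []], 5): A returns [[1], []], B raises IndexError; on _breakdown_qq([[]], 0): A raises UnboundLocalError, B raises IndexError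
import Mathlib
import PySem

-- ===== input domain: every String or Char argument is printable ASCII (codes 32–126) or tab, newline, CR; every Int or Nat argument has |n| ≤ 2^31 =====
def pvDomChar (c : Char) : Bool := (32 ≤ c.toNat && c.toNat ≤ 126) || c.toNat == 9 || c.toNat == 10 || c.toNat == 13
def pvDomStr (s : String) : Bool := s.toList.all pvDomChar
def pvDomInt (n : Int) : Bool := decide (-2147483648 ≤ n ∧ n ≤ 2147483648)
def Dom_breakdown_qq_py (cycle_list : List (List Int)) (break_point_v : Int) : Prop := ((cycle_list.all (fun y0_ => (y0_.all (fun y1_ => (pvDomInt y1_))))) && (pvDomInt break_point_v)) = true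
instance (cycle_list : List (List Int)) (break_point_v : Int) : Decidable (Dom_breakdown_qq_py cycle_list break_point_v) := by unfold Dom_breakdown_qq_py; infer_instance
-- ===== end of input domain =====

-- B replaces A's one-pass flag/accumulator scan by a find-break-point-indices-then-slice
-- decomposition (objective: alternative decomposition, same cost).

-- ===== PORT A =====
-- state: (last v seen so far (None before any iteration), reached_first_bp, new_cyc, base_cyc, new_cycle_list)
def bqStep (bp : Int) (st : Option Int × Bool × List Int × List Int × List (List Int)) (v : Int) :
    Option Int × Bool × List Int × List Int × List (List Int) :=
  match st with
  | (_, reached, new_cyc, base_cyc, acc) =>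
    if v = bp then
      if reached then (some v, true, [v], base_cyc, acc ++ [new_cyc ++ [v]])
      else (some v, true, [v], base_cyc, acc)
    else
      if reached then (some v, reached, new_cyc ++ [v], base_cyc, acc)
      else (some v, reached, new_cyc, base_cyc ++ [v], acc)

def bqCyc (bp : Int) (st : Option Int × List (List Int)) (cyc : List Int) :
    Option Int × List (List Int) :=
  match cyc.foldl (bqStep bp) (st.1, false, [], [], st.2) with
  | (v1, _, new_cyc, base_cyc, acc) =>
    match v1 with
    | some v => if v ≠ bp then (v1, acc ++ [base_cyc ++ new_cyc]) else (v1, acc)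
    | none => (v1, acc)  -- Python raises UnboundLocalError here (first cycle empty); excluded by Pre_

def breakdown_qq_py (cycle_list : List (List Int)) (break_point_v : Int) : List (List Int) :=
  (cycle_list.foldl (bqCyc break_point_v) (none, [])).2

-- ===== PORT B =====
def bqAltCyc (bp : Int) (acc : List (List Int)) (cyc : List Int) : List (List Int) :=
  let idx : List Int := ((PySem.List.enumerate cyc 0).filter (fun p => p.2 == bp)).map (·.1)
  let acc1 := (idx.zip idx.tail).foldl
    (fun a pr => a ++ [PySem.List.slice cyc (some pr.1) (some (pr.2 + 1))]) acc
  match PySem.List.pyGet? cyc (-1) with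
  | some last =>
    if last ≠ bp then
      match idx with
      | [] => acc1 ++ [cyc]
      | i0 :: rest =>
        acc1 ++ [PySem.List.slice cyc none (some i0) ++
                 PySem.List.slice cyc (some ((i0 :: rest).getLast (by simp))) none]
    else acc1
  | none => acc1  -- Python raises IndexError (cyc[-1] on empty cycle); excluded by Pre_

def breakdown_qq_py_alt (cycle_list : List (List Int)) (break_point_v : Int) : List (List Int) :=
  cycle_list.foldl (bqAltCyc break_point_v) []

-- ===== PRECONDITION & SPEC =====
-- Pre_ excludes cycle lists containing an empty cycle: there A either raises UnboundLocalError
-- (first cycle empty) or its result depends on the loop variable leaked from the previous cycle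
-- (a later cycle empty), while B's cyc[-1] raises IndexError.
def Pre_breakdown_qq_py (cycle_list : List (List Int)) (_break_point_v : Int) : Prop :=
  ∀ cyc ∈ cycle_list, cyc ≠ []
instance (cycle_list : List (List Int)) (break_point_v : Int) : Decidable (Pre_breakdown_qq_py cycle_list break_point_v) := by unfold Pre_breakdown_qq_py; infer_instance
def pvWitness_breakdown_qq_py : List (List Int) × Int := ([[1, 2, 3], [2, 1, 2, 4, 2], [5]], 2)

def Spec_breakdown_qq_py (cycle_list : List (List Int)) (break_point_v : Int) (out : List (List Int)) : Prop := out = breakdown_qq_py_alt cycle_list break_point_v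
instance (cycle_list : List (List Int)) (break_point_v : Int) (out : List (List Int)) : Decidable (Spec_breakdown_qq_py cycle_list break_point_v out) := by unfold Spec_breakdown_qq_py; infer_instance

-- ===== CLAIM =====
def Claim_equal_breakdown_qq_py : Prop := ∀ (cycle_list : List (List Int)) (break_point_v : Int), Dom_breakdown_qq_py cycle_list break_point_v → Pre_breakdown_qq_py cycle_list break_point_v → Spec_breakdown_qq_py cycle_list break_point_v (breakdown_qq_py cycle_list break_point_v)

-- ===== LEMMAS AND PROOFS =====

-- decomposition of a cycle: (bp-free prefix, groups each starting with bp)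
def chunks (bp : Int) : List Int → List Int × List (List Int)
  | [] => ([], [])
  | v :: rest =>
    let pg := chunks bp rest
    if v = bp then ([], (v :: pg.1) :: pg.2) else (v :: pg.1, pg.2)

-- the "middle" segments: each group but the last, closed off with the next group's leading bp
def mids (bp : Int) : List (List Int) → List (List Int)
  | [] => []
  | [_] => []
  | g :: gs => (g ++ [bp]) :: mids bp gs

-- absolute start positions of the groups
def posL (o : Nat) : List (List Int) → List Int
  | [] => []
  | g :: gs => (o : Int) :: posL (o + g.length) gs

theorem chunks_flatten (bp : Int) (l : List Int) :
    (chunks bp l).1 ++ (chunks bp l).2.flatten = l := by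
  induction l with
  | nil => simp [chunks]
  | cons v rest ih =>
    simp only [chunks]
    by_cases h : v = bp <;> simp [h, ih]

theorem chunks_groups_head (bp : Int) (l : List Int) :
    ∀ g ∈ (chunks bp l).2, ∃ t, g = bp :: t := by
  induction l with
  | nil => simp [chunks]
  | cons v rest ih =>
    simp only [chunks]
    by_cases h : v = bp
    · simp only [h]
      intro g hg
      rcases List.mem_cons.mp hg with rfl | hg
      · exact ⟨_, rfl⟩
      · exact ih g hg
    · simpa [h] using ih

theorem getLast?_cons_or (v : Int) (l : List Int) (v0 : Option Int) :
    Option.or (v :: l).getLast? v0 = Option.or l.getLast? (some v) := by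
  cases l with
  | nil => rfl
  | cons a as =>
    rw [List.getLast?_cons_cons]
    cases h : (a :: as).getLast? with
    | none => simp at h
    | some b => simp

-- A's inner loop in "reached" mode
theorem bqStep_reached (bp : Int) (l : List Int) :
    ∀ (n base : List Int) (acc : List (List Int)) (v0 : Option Int),
    l.foldl (bqStep bp) (v0, true, n, base, acc)
      = (Option.or l.getLast? v0, true,
         ((n ++ (chunks bp l).1) :: (chunks bp l).2).getLastD [],
         base, acc ++ mids bp ((n ++ (chunks bp l).1) :: (chunks bp l).2)) := by
  induction l with
  | nil => intro n base acc v0; simp [chunks, mids]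
  | cons v rest ih =>
    intro n base acc v0
    rw [List.foldl_cons, getLast?_cons_or]
    by_cases h : v = bp
    · subst h
      have hstep : bqStep v (v0, true, n, base, acc) v
          = (some v, true, [v], base, acc ++ [n ++ [v]]) := by
        simp [bqStep]
      rw [hstep, ih [v] base (acc ++ [n ++ [v]]) (some v)]
      simp only [chunks]
      simp [mids]
    · have hstep : bqStep bp (v0, true, n, base, acc) v
          = (some v, true, n ++ [v], base, acc) := by
        simp [bqStep, h]
      rw [hstep, ih (n ++ [v]) base acc (some v)]
      simp only [chunks]
      simp [h]

-- A's inner loop in "not yet reached" mode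
theorem bqStep_unreached (bp : Int) (l : List Int) :
    ∀ (base : List Int) (acc : List (List Int)) (v0 : Option Int),
    l.foldl (bqStep bp) (v0, false, [], base, acc)
      = (Option.or l.getLast? v0, !(chunks bp l).2.isEmpty,
         (chunks bp l).2.getLastD [],
         base ++ (chunks bp l).1, acc ++ mids bp (chunks bp l).2) := by
  induction l with
  | nil => intro base acc v0; simp [chunks, mids]
  | cons v rest ih =>
    intro base acc v0
    rw [List.foldl_cons, getLast?_cons_or]
    by_cases h : v = bp
    · subst h
      have hstep : bqStep v (v0, false, [], base, acc) v
          = (some v, true, [v], base, acc) := by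
        simp [bqStep]
      rw [hstep, bqStep_reached v rest [v] base acc (some v)]
      simp only [chunks]
      simp [List.getLastD]
    · have hstep : bqStep bp (v0, false, [], base, acc) v
          = (some v, false, [], base ++ [v], acc) := by
        simp [bqStep, h]
      rw [hstep, ih (base ++ [v]) acc (some v)]
      simp only [chunks]
      simp [h]

-- index characterization for B: positions of bp, via enumerate/filter
theorem idx_eq_posL (bp : Int) (cyc : List Int) :
    ∀ (s : Nat),
    (((PySem.List.enumerate cyc (s : Int)).filter (fun p => p.2 == bp)).map (·.1))
      = posL (s + (chunks bp cyc).1.length) (chunks bp cyc).2 := by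
  induction cyc with
  | nil => intro s; simp [PySem.List.enumerate_nil, chunks, posL]
  | cons v rest ih =>
    intro s
    rw [PySem.List.enumerate_cons]
    have hcast : ((s : Int) + 1) = ((s + 1 : Nat) : Int) := by push_cast; ring
    by_cases h : v = bp
    · subst h
      rcases hc : chunks v rest with ⟨p', gs'⟩
      have hrec := ih (s + 1)
      rw [hc] at hrec
      simp only [chunks, hc, List.filter_cons, beq_self_eq_true, if_true,
        List.map_cons]
      rw [hcast, hrec]
      simp only [posL, List.length_nil, Nat.add_zero, List.length_cons]
      congr 2
      omega
    · rcases hc : chunks bp rest with ⟨p', gs'⟩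
      have hrec := ih (s + 1)
      rw [hc] at hrec
      simp only [chunks, if_neg h, hc, List.filter_cons]
      rw [if_neg (by simpa using h), hcast, hrec]
      congr 1
      simp only [List.length_cons]
      omega

-- the middle slices of B equal mids
theorem slices_eq_mids (bp : Int) (gs : List (List Int)) :
    ∀ (o : Nat) (C : List Int), C.drop o = gs.flatten →
    (∀ g ∈ gs, ∃ t, g = bp :: t) →
    ((posL o gs).zip (posL o gs).tail).map
        (fun pr => PySem.List.slice C (some pr.1) (some (pr.2 + 1)))
      = mids bp gs := by
  induction gs with
  | nil => intro o C _ _; simp [posL, mids]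
  | cons g gs ih =>
    intro o C hdrop hheads
    cases gs with
    | nil => simp [posL, mids]
    | cons g' gs' =>
      simp only [posL, List.tail_cons, List.zip_cons_cons, List.map_cons, mids]
      congr 1
      · -- slice C o (o + |g| + 1) = g ++ [bp]
        rw [show (((o + g.length : Nat) : Int) + 1) = ((o + g.length + 1 : Nat) : Int) by push_cast; ring]
        rw [PySem.List.slice_natCast]
        rw [show o + g.length + 1 - o = g.length + 1 by omega, hdrop]
        obtain ⟨t', rfl⟩ := hheads g' (by simp)
        rw [List.flatten_cons, List.take_append]
        simp
      · have hdrop' : C.drop (o + g.length) = (g' :: gs').flatten := by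
          rw [← List.drop_drop, hdrop]
          simp [List.flatten_cons]
        exact ih (o + g.length) C hdrop' (fun g hg => hheads g (by simp [hg]))

-- B's last slice: dropping to the start of the last group yields the last group
theorem drop_posL_getLast (gs : List (List Int)) :
    ∀ (o : Nat) (C : List Int), C.drop o = gs.flatten → gs ≠ [] →
    ∀ (hne : posL o gs ≠ []),
    C.drop ((posL o gs).getLast hne).toNat = gs.getLastD [] := by
  induction gs with
  | nil => intro o C _ h; exact absurd rfl h
  | cons g gs ih =>
    intro o C hdrop _ hne
    cases gs with
    | nil => simpa [posL] using hdrop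
    | cons g' gs' =>
      have hdrop' : C.drop (o + g.length) = (g' :: gs').flatten := by
        rw [← List.drop_drop, hdrop]
        simp [List.flatten_cons]
      have h2 : posL (o + g.length) (g' :: gs') ≠ [] := by simp [posL]
      have : ((posL o (g :: g' :: gs')).getLast hne)
           = ((posL (o + g.length) (g' :: gs')).getLast h2) := by
        simp only [posL]
        exact List.getLast_cons _
      rw [this, ih (o + g.length) C hdrop' (by simp) h2]
      rfl

theorem posL_ne_nil_iff (o : Nat) (gs : List (List Int)) : posL o gs = [] ↔ gs = [] := by
  cases gs <;> simp [posL]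

theorem posL_cons_head {o : Nat} {gs : List (List Int)} {i : Int} {r : List Int}
    (h : posL o gs = i :: r) : i = (o : Int) ∧ gs ≠ [] := by
  cases gs with
  | nil => simp [posL] at h
  | cons g gs' =>
    simp only [posL, List.cons.injEq] at h
    exact ⟨h.1.symm, by simp⟩

theorem posL_nonneg (gs : List (List Int)) : ∀ (o : Nat), ∀ x ∈ posL o gs, 0 ≤ x := by
  induction gs with
  | nil => intro o x hx; simp [posL] at hx
  | cons g gs ih =>
    intro o x hx
    simp only [posL, List.mem_cons] at hx
    rcases hx with rfl | hx
    · exact Int.natCast_nonneg o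
    · exact ih (g.length + o) x (by rw [Nat.add_comm]; exact hx)

-- per-cycle agreement, for a non-empty cycle
theorem percycle (bp : Int) (cyc : List Int) (hne : cyc ≠ []) (v0 : Option Int)
    (acc : List (List Int)) :
    (bqCyc bp (v0, acc) cyc).2 = bqAltCyc bp acc cyc := by
  rcases hc : chunks bp cyc with ⟨p, gs⟩
  have hflat : p ++ gs.flatten = cyc := by have := chunks_flatten bp cyc; rw [hc] at this; exact this
  have hheads : ∀ g ∈ gs, ∃ t, g = bp :: t := by
    have := chunks_groups_head bp cyc; rw [hc] at this; exact this
  have hlast : cyc.getLast? = some (cyc.getLast hne) := List.getLast?_eq_some_getLast hne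
  have hdrop0 : cyc.drop p.length = gs.flatten := by
    conv_lhs => rw [← hflat]
    simp
  -- idx in B
  have hidx : (((PySem.List.enumerate cyc (0 : Int)).filter (fun pr => pr.2 == bp)).map (·.1))
      = posL p.length gs := by
    have := idx_eq_posL bp cyc 0
    rw [hc] at this
    simpa using this
  -- A side
  unfold bqCyc
  rw [bqStep_unreached bp cyc [] acc v0]
  rw [hc]
  simp only [hlast, Option.some_or]
  -- B side
  unfold bqAltCyc
  simp only [hidx]
  rw [PySem.List.foldl_append_singleton_eq_map
    (fun pr => PySem.List.slice cyc (some pr.1) (some (pr.2 + 1)))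
    ((posL p.length gs).zip (posL p.length gs).tail) acc]
  rw [slices_eq_mids bp gs p.length cyc hdrop0 hheads]
  rw [PySem.List.pyGet?_neg_one, hlast]
  simp only []
  by_cases hb : cyc.getLast hne = bp
  · simp [hb]
  · rw [if_pos (by simpa using hb), if_pos (by simpa using hb)]
    rcases hpl : posL p.length gs with _ | ⟨i0, restI⟩
    · have hgs : gs = [] := (posL_ne_nil_iff _ _).mp hpl
      rw [hgs] at hflat
      simp only [List.flatten_nil, List.append_nil] at hflat
      simp [hgs, mids, hflat]
    · obtain ⟨hi0, hgsne⟩ := posL_cons_head hpl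
      have hpne : posL p.length gs ≠ [] := by rw [hpl]; simp
      have h1 : PySem.List.slice cyc none (some i0) = p := by
        rw [hi0, PySem.List.slice_to_natCast]
        conv_lhs => rw [← hflat]
        simp
      have hget : (i0 :: restI).getLast (by simp) = (posL p.length gs).getLast hpne := by
        congr 1
        exact hpl.symm
      have hnonneg : 0 ≤ (posL p.length gs).getLast hpne :=
        posL_nonneg gs p.length _ (List.getLast_mem hpne)
      have h2 : PySem.List.slice cyc (some ((i0 :: restI).getLast (by simp))) none
          = gs.getLastD [] := by
        rw [hget]
        rw [PySem.List.slice_from cyc hnonneg]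
        exact drop_posL_getLast gs p.length cyc hdrop0 hgsne hpne
      simp [h1, h2]

-- outer fold
theorem outer (bp : Int) (cls : List (List Int)) :
    ∀ (v0 : Option Int) (acc : List (List Int)), (∀ c ∈ cls, c ≠ []) →
    (cls.foldl (bqCyc bp) (v0, acc)).2 = cls.foldl (bqAltCyc bp) acc := by
  induction cls with
  | nil => intro v0 acc _; rfl
  | cons c cls ih =>
    intro v0 acc hne
    rw [List.foldl_cons, List.foldl_cons]
    rcases hs : bqCyc bp (v0, acc) c with ⟨v1, acc1⟩
    have h2 : acc1 = bqAltCyc bp acc c := by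
      have := percycle bp c (hne c (by simp)) v0 acc
      rw [hs] at this
      exact this
    rw [h2] at hs ⊢
    rw [ih v1 _ (fun d hd => hne d (by simp [hd]))]

-- ===== VERDICT =====
theorem breakdown_qq_py_spec : Claim_equal_breakdown_qq_py := by
  intro cl bp _ hpre
  unfold Spec_breakdown_qq_py breakdown_qq_py breakdown_qq_py_alt
  exact outer bp cl none [] hpre
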